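-- pv_equiv track=rewrite | github.com/Litvin1/KNN-Perceptron-Passive-Agressive | ex_2.py | calcaluateWinner
-- ===== SOURCE A (Python) =====
-- def calcaluateWinner(d):
--     winners = set()
--     max_value = max(set(d), key=d.count)
--     for candidate in d:
--         if d.count(candidate) == d.count(max_value):
--             winners.add(candidate)
--     if len(winners) == 1:
--         return winners.pop()
--     else:
--         return min(winners)
-- ===== SOURCE B (Python) =====
-- def calcaluateWinner(d):
--     counts = {}
--     for x in d:
--         counts[x] = counts.get(x, 0) + 1
--     best = None
--     best_cnt = 0
--     for x, c in counts.items():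
--         if c > best_cnt or (c == best_cnt and x < best):
--             best = x
--             best_cnt = c
--     return best
-- ===== Notes on version B (the rewrite author's own statement) =====
-- stated objective: faster
-- what changed: Replace the repeated d.count scans (one per element, plus max over the set) with a single counting pass building a dict, then one pass over the distinct (element,count) pairs keeping the smallest element of maximal count.
-- outside the precondition, e.g. on calcaluateWinner([]): A raises ValueError, B returns None
import Mathlib
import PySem

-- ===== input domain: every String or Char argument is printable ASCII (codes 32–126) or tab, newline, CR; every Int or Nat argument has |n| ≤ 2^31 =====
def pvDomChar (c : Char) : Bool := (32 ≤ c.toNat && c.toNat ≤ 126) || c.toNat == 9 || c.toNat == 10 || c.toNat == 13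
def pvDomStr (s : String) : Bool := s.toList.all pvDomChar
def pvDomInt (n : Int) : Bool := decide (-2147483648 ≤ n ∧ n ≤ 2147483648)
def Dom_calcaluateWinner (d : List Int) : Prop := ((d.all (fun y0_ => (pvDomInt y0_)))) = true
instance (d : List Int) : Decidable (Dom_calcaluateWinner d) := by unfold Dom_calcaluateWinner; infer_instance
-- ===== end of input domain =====

-- B replaces A's repeated d.count scans with one counting pass over a dict plus one pass
-- over the distinct (element, count) pairs: an asymptotically faster algorithm, same result.


-- ===== PORT A =====
def calcaluateWinner (d : List Int) : Int :=
  -- max(set(d), key=d.count); on d = [] Python's max raises ValueError (excluded by Pre_)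
  match PySem.List.max? (PySem.Set.ofList d) (fun x => PySem.List.count d x) with
  | none => 0
  | some maxValue =>
    let winners : PySem.Set Int := d.foldl (fun w candidate =>
        if PySem.List.count d candidate = PySem.List.count d maxValue
        then PySem.Set.add w candidate else w) PySem.Set.empty
    if winners.length = 1 then
      winners.headD 0            -- set.pop() of a one-element set is its sole element
    else
      (PySem.List.min? winners (fun x => x)).getD 0   -- min of a nonempty set (no key)

-- ===== PORT B =====
def calcaluateWinner_alt (d : List Int) : Int :=
  let counts := d.foldl (fun m x => PySem.Dict.insert m x (PySem.Dict.getD m x 0 + 1))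
                  PySem.Dict.empty
  let r := (PySem.Dict.items counts).foldl
    (fun (st : Option Int × Int) xc =>
      -- 'c > best_cnt or (c == best_cnt and x < best)'; when best is None, best_cnt = 0
      -- and every count c ≥ 1, so the second disjunct is never the deciding one there
      if xc.2 > st.2 ∨ (xc.2 = st.2 ∧ xc.1 < st.1.getD 0) then (some xc.1, xc.2) else st)
    (none, 0)
  r.1.getD 0                      -- 'return best'; best is Some whenever d ≠ []

-- ===== PRECONDITION & SPEC =====
-- Pre_ excludes only d = [], on which A's max(set(d), ...) raises ValueError.
def Pre_calcaluateWinner (d : List Int) : Prop := d ≠ []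
instance (d : List Int) : Decidable (Pre_calcaluateWinner d) := by
  unfold Pre_calcaluateWinner; infer_instance

def pvWitness_calcaluateWinner : List Int := [1, 2, 2, 3, 3]

def Spec_calcaluateWinner (d : List Int) (out : Int) : Prop := out = calcaluateWinner_alt d
instance (d : List Int) (out : Int) : Decidable (Spec_calcaluateWinner d out) := by
  unfold Spec_calcaluateWinner; infer_instance

-- ===== CLAIM (what is proved, stated in full; the proofs are below) =====
def Claim_equal_calcaluateWinner : Prop :=
  ∀ (d : List Int), Dom_calcaluateWinner d → Pre_calcaluateWinner d →
    Spec_calcaluateWinner d (calcaluateWinner d)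

-- ===== LEMMAS AND PROOFS =====

-- the common characterisation: the smallest element of d among those of maximal count
def cwIsWin (d : List Int) (m : Int) : Prop :=
  m ∈ d ∧ (∀ x ∈ d, d.count x ≤ d.count m) ∧ (∀ x ∈ d, d.count x = d.count m → m ≤ x)

theorem cwIsWin_unique {d : List Int} {a b : Int} (ha : cwIsWin d a) (hb : cwIsWin d b) :
    a = b := by
  obtain ⟨hma, hmaxa, hmina⟩ := ha
  obtain ⟨hmb, hmaxb, hminb⟩ := hb
  have h1 := hmaxa b hmb
  have h2 := hmaxb a hma
  have := hmina b hmb (by omega)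
  have := hminb a hma (by omega)
  omega

-- membership in the winners-accumulating loop of A
theorem cwMemFold (p : Int → Prop) [DecidablePred p] :
    ∀ (l : List Int) (w : PySem.Set Int) (y : Int),
      y ∈ l.foldl (fun w c => if p c then PySem.Set.add w c else w) w ↔
        (y ∈ w ∨ (y ∈ l ∧ p y)) := by
  intro l
  induction l with
  | nil => simp
  | cons k t ih =>
    intro w y
    simp only [List.foldl_cons]
    by_cases hk : p k
    · simp only [if_pos hk, ih, PySem.Set.mem_add, List.mem_cons]
      constructor
      · rintro ((h | rfl) | h)
        · exact Or.inl h
        · exact Or.inr ⟨Or.inl rfl, hk⟩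
        · exact Or.inr ⟨Or.inr h.1, h.2⟩
      · rintro (h | ⟨(rfl | h), hy⟩)
        · exact Or.inl (Or.inl h)
        · exact Or.inl (Or.inr rfl)
        · exact Or.inr ⟨h, hy⟩
    · simp only [if_neg hk, ih, List.mem_cons]
      constructor
      · rintro (h | h)
        · exact Or.inl h
        · exact Or.inr ⟨Or.inr h.1, h.2⟩
      · rintro (h | ⟨(rfl | h), hy⟩)
        · exact Or.inl h
        · exact absurd hy hk
        · exact Or.inr ⟨h, hy⟩

theorem cwA_isWin (d : List Int) (hd : d ≠ []) : cwIsWin d (calcaluateWinner d) := by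
  obtain ⟨z, hz⟩ := List.exists_mem_of_ne_nil d hd
  have hzof : z ∈ PySem.Set.ofList d := (PySem.Set.mem_ofList _ _).2 hz
  obtain ⟨maxValue, hmax⟩ :
      ∃ m, PySem.List.max? (PySem.Set.ofList d) (fun x => PySem.List.count d x) = some m := by
    cases hcase : PySem.List.max? (PySem.Set.ofList d) (fun x => PySem.List.count d x) with
    | none =>
      rw [PySem.List.max?_eq_none_iff] at hcase
      rw [hcase] at hzof; simp at hzof
    | some m => exact ⟨m, rfl⟩
  have hmv_mem : maxValue ∈ d := (PySem.Set.mem_ofList _ _).1 (PySem.List.max?_mem hmax)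
  have hmv_max : ∀ x ∈ d, d.count x ≤ d.count maxValue := by
    intro x hx
    have := PySem.List.max?_isMax hmax x ((PySem.Set.mem_ofList _ _).2 hx)
    simpa [PySem.List.count] using this
  unfold calcaluateWinner
  rw [hmax]
  simp only []
  set p := fun c : Int => PySem.List.count d c = PySem.List.count d maxValue with hp
  have hmem : ∀ y : Int,
      y ∈ d.foldl (fun w c => if p c then PySem.Set.add w c else w) PySem.Set.empty ↔
        (y ∈ d ∧ d.count y = d.count maxValue) := by
    intro y
    rw [cwMemFold p d PySem.Set.empty y]
    simp [hp, PySem.Set.empty, PySem.List.count]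
  set winners := d.foldl (fun w c => if p c then PySem.Set.add w c else w) PySem.Set.empty
    with hw
  have hne : winners ≠ [] := by
    intro h
    have := (hmem maxValue).2 ⟨hmv_mem, rfl⟩
    rw [h] at this; simp at this
  by_cases hlen : winners.length = 1
  · obtain ⟨w, hwe⟩ := List.length_eq_one_iff.1 hlen
    have hwmem := (hmem w).1 (by rw [hwe]; simp)
    have hres : (if winners.length = 1 then winners.headD 0
        else (PySem.List.min? winners (fun x => x)).getD 0) = w := by
      rw [if_pos hlen, hwe]; rfl
    rw [hres]
    refine ⟨hwmem.1, ?_, ?_⟩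
    · intro x hx
      rw [hwmem.2]; exact hmv_max x hx
    · intro x hx hc
      have hxw : x ∈ winners := (hmem x).2 ⟨hx, by rw [hc, hwmem.2]⟩
      rw [hwe] at hxw
      simp at hxw
      omega
  · obtain ⟨m, hm⟩ : ∃ m, PySem.List.min? winners (fun x => x) = some m := by
      cases hcase : PySem.List.min? winners (fun x => x) with
      | none => exact absurd ((PySem.List.min?_eq_none_iff _ _).1 hcase) hne
      | some m => exact ⟨m, rfl⟩
    have hmmem := (hmem m).1 (PySem.List.min?_mem hm)
    have hres : (if winners.length = 1 then winners.headD 0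
        else (PySem.List.min? winners (fun x => x)).getD 0) = m := by
      rw [if_neg hlen, hm]; rfl
    rw [hres]
    refine ⟨hmmem.1, ?_, ?_⟩
    · intro x hx
      rw [hmmem.2]; exact hmv_max x hx
    · intro x hx hc
      have hxw : x ∈ winners := (hmem x).2 ⟨hx, by rw [hc, hmmem.2]⟩
      simpa using PySem.List.min?_isMin hm x hxw

-- the invariant of B's selection pass, once a first candidate is installed
theorem cwB_fold (d : List Int) :
    ∀ (l : List Int) (b : Int), b ∈ d → (∀ x ∈ l, x ∈ d) →
      ∃ b', l.foldl
          (fun (st : Option Int × Int) k =>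
            if (d.count k : Int) > st.2 ∨ ((d.count k : Int) = st.2 ∧ k < st.1.getD 0)
            then (some k, (d.count k : Int)) else st)
          (some b, (d.count b : Int)) = (some b', (d.count b' : Int)) ∧
        b' ∈ d ∧
        (∀ x ∈ l, d.count x ≤ d.count b' ∧ (d.count x = d.count b' → b' ≤ x)) ∧
        d.count b ≤ d.count b' ∧ (d.count b = d.count b' → b' ≤ b) := by
  intro l
  induction l with
  | nil => intro b hb _; exact ⟨b, rfl, hb, by simp, le_refl _, fun _ => le_refl _⟩
  | cons k t ih =>
    intro b hb hl
    have hk : k ∈ d := hl k (List.mem_cons_self)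
    simp only [List.foldl_cons, Option.getD]
    by_cases hcond : (d.count k : Int) > (d.count b : Int) ∨
        ((d.count k : Int) = (d.count b : Int) ∧ k < b)
    · rw [if_pos hcond]
      obtain ⟨b', he, hbd, ht, hle, heq⟩ := ih k hk (fun x hx => hl x (List.mem_cons_of_mem _ hx))
      refine ⟨b', he, hbd, ?_, ?_, ?_⟩
      · intro x hx
        rcases List.mem_cons.1 hx with rfl | hx
        · exact ⟨hle, heq⟩
        · exact ht x hx
      · rcases hcond with h | ⟨h, _⟩
        · omega
        · omega
      · intro hc
        rcases hcond with h | ⟨h, hlt⟩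
        · omega
        · have : b' ≤ k := heq (by omega)
          omega
    · rw [if_neg hcond]
      obtain ⟨b', he, hbd, ht, hle, heq⟩ := ih b hb (fun x hx => hl x (List.mem_cons_of_mem _ hx))
      push Not at hcond
      refine ⟨b', he, hbd, ?_, hle, heq⟩
      intro x hx
      rcases List.mem_cons.1 hx with rfl | hx
      · constructor
        · rcases lt_or_ge (d.count x : Int) (d.count b : Int) with h | h
          · omega
          · have h1 : (d.count x : Int) = (d.count b : Int) := le_antisymm (hcond.1) h
            have := hcond.2 h1
            omega
        · intro hc
          rcases lt_or_ge (d.count x : Int) (d.count b : Int) with h | h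
          · omega
          · have h1 : (d.count x : Int) = (d.count b : Int) := le_antisymm (hcond.1) h
            have hbk : b ≤ x := hcond.2 h1
            have : b' ≤ b := heq (by omega)
            omega
      · exact ht x hx

theorem cwB_isWin (d : List Int) (hd : d ≠ []) : cwIsWin d (calcaluateWinner_alt d) := by
  unfold calcaluateWinner_alt
  rw [PySem.Dict.foldl_insert_getD_add_one_eq_counter]
  simp only [PySem.Dict.items_counter, List.foldl_map]
  obtain ⟨k0, rest, hof⟩ : ∃ k0 rest, PySem.Set.ofList d = k0 :: rest := by
    cases hcase : PySem.Set.ofList d with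
    | nil =>
      obtain ⟨z, hz⟩ := List.exists_mem_of_ne_nil d hd
      have := (PySem.Set.mem_ofList _ _).2 hz
      rw [hcase] at this; simp at this
    | cons a l => exact ⟨a, l, rfl⟩
  have hk0 : k0 ∈ d := (PySem.Set.mem_ofList _ _).1 (by rw [hof]; simp)
  have hrest : ∀ x ∈ rest, x ∈ d := by
    intro x hx
    exact (PySem.Set.mem_ofList _ _).1 (by rw [hof]; simp [hx])
  rw [hof]
  simp only [List.foldl_cons]
  have hpos : (0:Int) < (d.count k0 : Int) := by
    have := List.count_pos_iff.2 hk0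
    omega
  rw [if_pos (Or.inl hpos)]
  obtain ⟨b', he, hbd, ht, hle, heq⟩ := cwB_fold d rest k0 hk0 hrest
  rw [he]
  refine ⟨hbd, ?_, ?_⟩
  · intro x hx
    have hxof : x ∈ PySem.Set.ofList d := (PySem.Set.mem_ofList _ _).2 hx
    rw [hof] at hxof
    rcases List.mem_cons.1 hxof with rfl | hxr
    · exact hle
    · exact (ht x hxr).1
  · intro x hx hc
    have hxof : x ∈ PySem.Set.ofList d := (PySem.Set.mem_ofList _ _).2 hx
    rw [hof] at hxof
    rcases List.mem_cons.1 hxof with rfl | hxr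
    · exact heq hc
    · exact (ht x hxr).2 hc

-- ===== VERDICT (by name: the statement is the Claim_ definition above) =====
theorem calcaluateWinner_spec : Claim_equal_calcaluateWinner := by
  intro d _ hpre
  unfold Spec_calcaluateWinner
  exact cwIsWin_unique (cwA_isWin d hpre) (cwB_isWin d hpre)
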